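-- pv_equiv track=rewrite | github.com/A-Lounsbury/prime-constant | prime_constant.py | generate
-- ===== SOURCE A (Python) =====
-- def prime(n):
--     if n == 1:
--         return False
--
--     for i in range(2, n):
--         if n % i == 0:
--             return False
--     return True
--
-- def generate(n):
--     sequence = []
--     while len(sequence) < n:
--         for m in range(1, n):
--             # loop through the numbers less than m
--             for i in range(2, m):
--                 # if prime and doesn't divide m, add it to the sequence and move to the next number
--                 if prime(i) and m % i != 0 and len(sequence) < n:
--                     sequence.append(i)
--                     break
--     return sequence
-- ===== SOURCE B (Python) =====
-- def is_prime(k):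
--     return k >= 2 and all(k % d for d in range(2, k))
--
-- def generate(n):
--     if n <= 0:
--         return []
--     pattern = []
--     for m in range(3, n):
--         p = next((i for i in range(2, m) if m % i and is_prime(i)), None)
--         if p is not None:
--             pattern.append(p)
--     reps = -(-n // len(pattern))  # ceil(n / len(pattern)); ZeroDivisionError for 1 <= n <= 3, where A never terminates
--     return (pattern * reps)[:n]
-- ===== Notes on version B (the rewrite author's own statement) =====
-- stated objective: faster
-- what changed: B computes the first-prime-non-divisor pattern once in a single pass and tiles it to length n by list multiplication, replacing A's repeated while-passes whose final pass rescans every range(2,m) with trial-division primality tests and no break once the sequence is full.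
-- outside the precondition, e.g. on generate(1): A does not finish within the time limit, B raises ZeroDivisionError; on generate(3): A does not finish within the time limit, B raises ZeroDivisionError
import Mathlib
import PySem

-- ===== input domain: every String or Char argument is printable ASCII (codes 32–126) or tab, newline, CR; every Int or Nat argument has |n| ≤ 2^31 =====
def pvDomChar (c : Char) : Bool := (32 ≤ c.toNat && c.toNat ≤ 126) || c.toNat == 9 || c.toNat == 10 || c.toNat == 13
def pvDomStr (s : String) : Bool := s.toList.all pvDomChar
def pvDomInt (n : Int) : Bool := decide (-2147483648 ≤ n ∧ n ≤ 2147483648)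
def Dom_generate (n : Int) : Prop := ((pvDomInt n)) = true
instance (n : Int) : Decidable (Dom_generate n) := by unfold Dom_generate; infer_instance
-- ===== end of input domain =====

-- B computes the per-m pattern ONCE in a single pass and tiles it to length n, instead of
-- A's repeated while-passes (whose final pass rescans every range(2,m) with no break once full).
-- Equivalence of RETURN values on Pre_ (A diverges for 1 ≤ n ≤ 3, which Pre_ excludes).

-- ===== PORT A =====
def pvPrimeLoop (n : Int) : List Int → Bool
  | [] => true
  | i :: rest => if PySem.Int.mod n i == 0 then false else pvPrimeLoop n rest

def pvPrime (n : Int) : Bool :=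
  if n == 1 then false else pvPrimeLoop n (PySem.List.pyRange 2 n 1)

-- inner 'for i in range(2, m)' with its break
def pvInner (n m : Int) (seq : List Int) : List Int → List Int
  | [] => seq
  | i :: rest =>
    if pvPrime i && PySem.Int.mod m i != 0 && decide ((seq.length : Int) < n)
    then seq ++ [i]
    else pvInner n m seq rest

-- one 'for m in range(1, n)' pass of the while body
def pvPass (n : Int) (seq : List Int) : List Int :=
  (PySem.List.pyRange 1 n 1).foldl (fun s m => pvInner n m s (PySem.List.pyRange 2 m 1)) seq

-- the while loop; fuel n.toNat suffices because each pass appends at least one element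
-- whenever the sequence is still short (n ≥ 4); for 1 ≤ n ≤ 3 the Python loops forever (outside Pre_)
def pvWhile (n : Int) : Nat → List Int → List Int
  | 0, seq => seq
  | fuel + 1, seq => if (seq.length : Int) < n then pvWhile n fuel (pvPass n seq) else seq

def generate (n : Int) : List Int := pvWhile n n.toNat []

-- ===== PORT B =====
def pvIsPrime (k : Int) : Bool :=
  decide (2 ≤ k) && (PySem.List.pyRange 2 k 1).all (fun d => PySem.Int.mod k d != 0)

-- next((i for i in range(2, m) if m % i and is_prime(i)), None)
def pvSpn (m : Int) : List Int → Option Int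
  | [] => none
  | i :: rest => if PySem.Int.mod m i != 0 && pvIsPrime i then some i else pvSpn m rest

def pvPattern (n : Int) : List Int :=
  (PySem.List.pyRange 3 n 1).foldl
    (fun l m =>
      match pvSpn m (PySem.List.pyRange 2 m 1) with
      | some p => l ++ [p]
      | none => l) []

def generate_alt (n : Int) : List Int :=
  if n ≤ 0 then []
  else
    let pattern := pvPattern n
    -- reps = -(-n // len(pattern)) = ceil(n / len); len = 0 only for 1 ≤ n ≤ 3, outside Pre_
    let reps := -(PySem.Int.floordiv (-n) (pattern.length : Int))
    -- (pattern * reps)[:n], exact since n ≥ 1 here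
    (List.flatten (List.replicate reps.toNat pattern)).take n.toNat

-- ===== PRECONDITION & SPEC =====
-- Pre_ excludes 1 ≤ n ≤ 3, where Python A never terminates (no m yields a prime non-divisor).
def Pre_generate (n : Int) : Prop := n ≤ 0 ∨ 4 ≤ n
instance (n : Int) : Decidable (Pre_generate n) := by unfold Pre_generate; infer_instance
def pvWitness_generate : Int := (6)

def Spec_generate (n : Int) (out : List Int) : Prop := out = generate_alt n
instance (n : Int) (out : List Int) : Decidable (Spec_generate n out) := by unfold Spec_generate; infer_instance

-- ===== CLAIM (what is proved, stated in full; the proofs are below) =====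
def Claim_equal_generate : Prop := ∀ (n : Int), Dom_generate n → Pre_generate n → Spec_generate n (generate n)

-- ===== LEMMAS AND PROOFS =====

-- first match on a scan of ms (shared characterisation of both inner scans)
def pvOpt (m : Int) : Option Int := pvSpn m (PySem.List.pyRange 2 m 1)

theorem pvPrimeLoop_eq_all (n : Int) (l : List Int) :
    pvPrimeLoop n l = l.all (fun i => PySem.Int.mod n i != 0) := by
  induction l with
  | nil => rfl
  | cons i rest ih => simp [pvPrimeLoop, ih]; by_cases h : PySem.Int.mod n i = 0 <;> simp [h]

theorem pvPrime_eq_isPrime (i : Int) (hi : 2 ≤ i) : pvPrime i = pvIsPrime i := by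
  have : (i == 1) = false := by simp; omega
  simp [pvPrime, pvIsPrime, this, pvPrimeLoop_eq_all, hi]

theorem pvInner_eq (n m : Int) (s l : List Int) (hl : ∀ x ∈ l, 2 ≤ x) :
    pvInner n m s l =
      if (s.length : Int) < n then
        (match pvSpn m l with
         | some v => s ++ [v]
         | none => s)
      else s := by
  induction l with
  | nil => simp [pvInner, pvSpn]
  | cons i rest ih =>
    have h2 : 2 ≤ i := hl i (by simp)
    have ih' := ih (fun x hx => hl x (by simp [hx]))
    simp only [pvInner, pvSpn, pvPrime_eq_isPrime i h2]
    by_cases hc : (PySem.Int.mod m i != 0) = true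
    · by_cases hp : pvIsPrime i = true
      · by_cases hlen : (s.length : Int) < n
        · simp [hc, hp, hlen]
        · rw [ih']; simp [hc, hp, hlen]
      · simp at hp; rw [ih']; simp [hc, hp]
    · simp at hc; rw [ih']; simp [hc]

-- A's pass over any list of m's appends the first-matches, truncated at length n
theorem pvPassFold (n : Int) (ms : List Int) (s : List Int) :
    ms.foldl (fun s m => pvInner n m s (PySem.List.pyRange 2 m 1)) s =
      s ++ (ms.filterMap pvOpt).take (n.toNat - s.length) := by
  induction ms generalizing s with
  | nil => simp
  | cons m rest ih =>
    simp only [List.foldl_cons, List.filterMap_cons]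
    rw [pvInner_eq n m s _ (fun x hx => (PySem.List.mem_pyRange_one.mp hx).1)]
    rw [show pvSpn m (PySem.List.pyRange 2 m 1) = pvOpt m from rfl]
    by_cases hlen : (s.length : Int) < n
    · rw [if_pos hlen]
      cases hopt : pvOpt m with
      | none => simp [ih]
      | some v =>
        have htk : n.toNat - s.length = (n.toNat - (s.length + 1)) + 1 := by omega
        simp [ih, htk]
    · rw [if_neg hlen]
      have h0 : n.toNat - s.length = 0 := by omega
      cases hopt : pvOpt m with
      | none => simp [ih, h0]
      | some v => simp [ih, h0]

theorem pvPattern_eq (n : Int) :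
    pvPattern n = (PySem.List.pyRange 3 n 1).filterMap pvOpt := by
  unfold pvPattern
  have key : ∀ (ms : List Int) (acc : List Int),
      ms.foldl (fun l m =>
        match pvSpn m (PySem.List.pyRange 2 m 1) with
        | some p => l ++ [p]
        | none => l) acc = acc ++ ms.filterMap pvOpt := by
    intro ms
    induction ms with
    | nil => simp
    | cons m rest ih =>
      intro acc
      simp only [List.foldl_cons, List.filterMap_cons]
      cases hopt : pvOpt m with
      | none => simp only [pvOpt] at hopt; simp [hopt, ih]
      | some v => simp only [pvOpt] at hopt; simp [hopt, ih]
  simpa using key (PySem.List.pyRange 3 n 1) []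

theorem pvPass_eq (n : Int) (hn : 4 ≤ n) (s : List Int) :
    pvPass n s = s ++ (pvPattern n).take (n.toNat - s.length) := by
  unfold pvPass
  rw [pvPassFold, pvPattern_eq]
  have hsplit : PySem.List.pyRange 1 n 1 =
      PySem.List.pyRange 1 3 1 ++ PySem.List.pyRange 3 n 1 :=
    PySem.List.pyRange_one_append 1 3 n (by omega) (by omega)
  have h13 : PySem.List.pyRange 1 3 1 = [1, 2] := by decide
  rw [hsplit, h13]
  have h1 : pvOpt 1 = none := rfl
  have h2 : pvOpt 2 = none := rfl
  simp [h1, h2]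

theorem pvPattern_ne_nil (n : Int) (hn : 4 ≤ n) : pvPattern n ≠ [] := by
  rw [pvPattern_eq]
  have : PySem.List.pyRange 3 n 1 = 3 :: PySem.List.pyRange 4 n 1 :=
    PySem.List.pyRange_one_cons (by omega)
  rw [this]
  have h3 : pvOpt 3 = some 2 := rfl
  simp [h3]

theorem pvWhile_eq (n : Int) (hn : 4 ≤ n) :
    ∀ (fuel : Nat) (s : List Int), n ≤ (s.length : Int) + fuel →
      pvWhile n fuel s =
        s ++ (List.flatten (List.replicate fuel (pvPattern n))).take (n.toNat - s.length) := by
  intro fuel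
  induction fuel with
  | zero =>
    intro s hs
    have h0 : n.toNat - s.length = 0 := by simp at hs; omega
    simp [pvWhile, h0]
  | succ fuel ih =>
    intro s hs
    by_cases hlen : (s.length : Int) < n
    · have hstep : pvWhile n (fuel + 1) s = pvWhile n fuel (pvPass n s) := by
        simp [pvWhile, hlen]
      rw [hstep, pvPass_eq n hn s]
      set L := pvPattern n with hL
      have hLne : L ≠ [] := pvPattern_ne_nil n hn
      have hLpos : 1 ≤ L.length := List.length_pos_of_ne_nil hLne
      have hlen' : (s ++ L.take (n.toNat - s.length)).length
          = s.length + min (n.toNat - s.length) L.length := by simp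
      have hrec := ih (s ++ L.take (n.toNat - s.length)) (by
        rw [hlen']; push_cast; omega)
      rw [hrec, hlen']
      rw [List.replicate_succ, List.flatten_cons,
        List.take_append, List.append_assoc]
      rw [show n.toNat - (s.length + min (n.toNat - s.length) L.length)
            = n.toNat - s.length - L.length from by omega]
    · have : n.toNat - s.length = 0 := by omega
      simp [pvWhile, hlen, this]

theorem take_flatten_replicate_stable (L : List Int) (k a b : Nat)
    (ha : k ≤ a * L.length) (hab : a ≤ b) :
    (List.flatten (List.replicate a L)).take k = (List.flatten (List.replicate b L)).take k := by
  have hsplit : List.replicate b L = List.replicate a L ++ List.replicate (b - a) L := by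
    rw [← List.replicate_add]; congr 1; omega
  rw [hsplit, List.flatten_append, List.take_append]
  have hlen : (List.flatten (List.replicate a L)).length = a * L.length := by
    simp
  rw [hlen]
  have : k - a * L.length = 0 := by omega
  simp [this]

-- ===== VERDICT (by name: the statement is the Claim_ definition above) =====
theorem generate_spec : Claim_equal_generate := by
  intro n _ hpre
  unfold Spec_generate
  rcases hpre with hle | hge
  · have h0 : n.toNat = 0 := by omega
    simp [generate, generate_alt, h0, hle, pvWhile]
  · have hnpos : ¬ (n ≤ 0) := by omega
    have hLne : pvPattern n ≠ [] := pvPattern_ne_nil n hge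
    have hLpos : 1 ≤ (pvPattern n).length := List.length_pos_of_ne_nil hLne
    have hW := pvWhile_eq n hge n.toNat [] (by simp)
    show pvWhile n n.toNat [] = _
    rw [hW]
    unfold generate_alt
    rw [if_neg hnpos]
    simp only [List.nil_append, List.length_nil, Nat.sub_zero]
    have hq := (PySem.Int.neg_floordiv_neg_eq_iff_of_pos (a := n)
        (b := ((pvPattern n).length : Int)) (by exact_mod_cast hLpos)
        (q := -(PySem.Int.floordiv (-n) ((pvPattern n).length : Int)))).mp rfl
    set r : Int := -(PySem.Int.floordiv (-n) ((pvPattern n).length : Int)) with hr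
    have hr1 : 1 ≤ r := by nlinarith [hq.1, hq.2]
    have h1 : n.toNat ≤ r.toNat * (pvPattern n).length := by
      have := hq.2
      zify
      rw [Int.toNat_of_nonneg (by omega), Int.toNat_of_nonneg (by omega)]
      exact this
    have h2 : r.toNat ≤ n.toNat := by
      have hb : (r - 1) * ((pvPattern n).length : Int) < n := hq.1
      have : r - 1 < n := by nlinarith
      omega
    exact (take_flatten_replicate_stable (pvPattern n) n.toNat r.toNat n.toNat h1 h2).symm
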